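-- pv_equiv track=rewrite | github.com/Shravan1610/main-project | backend/src/features/news-intel/services/brief_service.py | _category_split
-- ===== SOURCE A (Python) =====
-- def _category_split(news: list[dict]) -> tuple[list[str], list[str]]:
--     risks: list[str] = []
--     opportunities: list[str] = []
--
--     for article in news[:8]:
--         title = str(article.get("title") or "").strip()
--         category = str(article.get("category") or "general").lower()
--         if not title:
--             continue
--
--         if category in {"risk", "disaster", "regulation", "supply-chain"} and len(risks) < 3:
--             risks.append(title)
--         if category in {"opportunity", "earnings", "macro"} and len(opportunities) < 3:
--             opportunities.append(title)
--
--     return risks, opportunities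
-- ===== SOURCE B (Python) =====
-- def _category_split(news: list[dict]) -> tuple[list[str], list[str]]:
--     top = news[:8]
--
--     def pick(article, cats):
--         title = str(article.get("title") or "").strip()
--         category = str(article.get("category") or "general").lower()
--         return title if title and category in cats else None
--
--     risks = [t for a in top
--              if (t := pick(a, {"risk", "disaster", "regulation", "supply-chain"})) is not None][:3]
--     opportunities = [t for a in top
--                      if (t := pick(a, {"opportunity", "earnings", "macro"})) is not None][:3]
--     return risks, opportunities
-- ===== Notes on version B (the rewrite author's own statement) =====
-- stated objective: simpler
-- what changed: Replaces the single interleaved loop with two mutable capped accumulators by two independent filtered passes (one per category group) truncated with [:3].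
import Mathlib
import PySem

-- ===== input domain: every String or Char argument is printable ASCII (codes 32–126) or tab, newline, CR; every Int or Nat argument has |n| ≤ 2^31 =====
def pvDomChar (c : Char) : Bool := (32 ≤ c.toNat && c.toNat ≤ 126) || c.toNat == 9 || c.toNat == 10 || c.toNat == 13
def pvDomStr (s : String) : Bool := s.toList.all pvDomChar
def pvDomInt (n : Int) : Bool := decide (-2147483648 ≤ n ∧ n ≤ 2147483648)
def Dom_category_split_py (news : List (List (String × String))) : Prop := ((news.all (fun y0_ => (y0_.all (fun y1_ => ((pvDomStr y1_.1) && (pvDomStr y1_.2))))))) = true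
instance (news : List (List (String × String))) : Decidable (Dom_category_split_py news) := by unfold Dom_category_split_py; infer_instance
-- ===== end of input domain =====

-- B replaces A's single interleaved capped-accumulator loop by two independent
-- filtered passes truncated with take 3 (objective: simpler decomposition).

-- shared helpers: both Pythons compute title/category of an article identically
def pvTitle (a : List (String × String)) : String :=
  PySem.Str.strip ((a.lookup "title").getD "")

def pvCat (a : List (String × String)) : String :=
  let c := (a.lookup "category").getD ""
  PySem.Str.lower (if c = "" then "general" else c)

def pvRiskCats : List String := ["risk", "disaster", "regulation", "supply-chain"]
def pvOppCats : List String := ["opportunity", "earnings", "macro"]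

-- ===== PORT A =====
def pvStepA (st : List String × List String) (article : List (String × String)) :
    List String × List String :=
  let title := pvTitle article
  let category := pvCat article
  if title = "" then st
  else
    let risks := if category ∈ pvRiskCats ∧ st.1.length < 3 then st.1 ++ [title] else st.1
    let opportunities := if category ∈ pvOppCats ∧ st.2.length < 3 then st.2 ++ [title] else st.2
    (risks, opportunities)

def category_split_py (news : List (List (String × String))) : List String × List String :=
  (PySem.List.slice news none (some 8)).foldl pvStepA ([], [])

-- ===== PORT B =====
def pvPick (cats : List String) (article : List (String × String)) : Option String :=
  let title := pvTitle article
  if title ≠ "" ∧ pvCat article ∈ cats then some title else none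

def category_split_py_alt (news : List (List (String × String))) : List String × List String :=
  let top := PySem.List.slice news none (some 8)
  ((top.filterMap (pvPick pvRiskCats)).take 3, (top.filterMap (pvPick pvOppCats)).take 3)

-- ===== PRECONDITION & SPEC =====
def Spec_category_split_py (news : List (List (String × String))) (out : List String × List String) : Prop := out = category_split_py_alt news
instance (news : List (List (String × String))) (out : List String × List String) : Decidable (Spec_category_split_py news out) := by unfold Spec_category_split_py; infer_instance

-- ===== CLAIM (what is proved, stated in full; the proofs are below) =====
def Claim_equal_category_split_py : Prop := ∀ (news : List (List (String × String))), Dom_category_split_py news → Spec_category_split_py news (category_split_py news)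

-- ===== LEMMAS AND PROOFS =====

-- A's interleaved loop, from any accumulator pair, is the two filtered lists
-- truncated to what room the caps still leave.
theorem pvFoldl_split (l : List (List (String × String))) (r o : List String) :
    l.foldl pvStepA (r, o) =
      (r ++ (l.filterMap (pvPick pvRiskCats)).take (3 - r.length),
       o ++ (l.filterMap (pvPick pvOppCats)).take (3 - o.length)) := by
  induction l generalizing r o with
  | nil => simp
  | cons a l ih =>
    simp only [List.foldl_cons, List.filterMap_cons]
    by_cases ht : pvTitle a = ""
    · have hs : pvStepA (r, o) a = (r, o) := by simp [pvStepA, ht]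
      have hp : ∀ cats, pvPick cats a = none := by intro cats; simp [pvPick, ht]
      rw [hs, hp, hp, ih]
    · have hs : pvStepA (r, o) a =
          ((if pvCat a ∈ pvRiskCats ∧ r.length < 3 then r ++ [pvTitle a] else r),
           (if pvCat a ∈ pvOppCats ∧ o.length < 3 then o ++ [pvTitle a] else o)) := by
        simp [pvStepA, ht]
      have hp : ∀ cats, pvPick cats a =
          (if pvCat a ∈ cats then some (pvTitle a) else none) := by
        intro cats; simp [pvPick, ht]
      rw [hs, hp, hp, ih]
      simp only [Prod.mk.injEq]
      constructor
      · by_cases hr : pvCat a ∈ pvRiskCats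
        · by_cases hl : r.length < 3
          · have h3 : 3 - r.length = (3 - (r ++ [pvTitle a]).length) + 1 := by
              simp; omega
            simp [hr, hl, h3, List.take_succ_cons]
          · have h3 : 3 - r.length = 0 := by omega
            simp [hr, hl, h3]
        · simp [hr]
      · by_cases hoc : pvCat a ∈ pvOppCats
        · by_cases hl : o.length < 3
          · have h3 : 3 - o.length = (3 - (o ++ [pvTitle a]).length) + 1 := by
              simp; omega
            simp [hoc, hl, h3, List.take_succ_cons]
          · have h3 : 3 - o.length = 0 := by omega
            simp [hoc, hl, h3]
        · simp [hoc]

-- ===== VERDICT (by name: the statement is the Claim_ definition above) =====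
theorem category_split_py_spec : Claim_equal_category_split_py := by
  intro news _
  unfold Spec_category_split_py category_split_py category_split_py_alt
  rw [pvFoldl_split]
  simp
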